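-- pv_equiv track=rewrite | github.com/kdd-lab/YSocial_SBD | y_web/tests/performance_comparison_demo.py | old_approach_simulation
-- ===== SOURCE A (Python) =====
-- def old_approach_simulation(num_agents):
--     """Simulate the old approach with individual commits."""
--     operations = 0
--
--     for _ in range(num_agents):
--         # Add agent
--         operations += 1  # db.session.add(agent)
--         operations += 1  # db.session.commit()
--
--         # Add agent_population relationship
--         operations += 1  # db.session.add(agent_population)
--         operations += 1  # db.session.commit()
--
--     return operations
-- ===== SOURCE B (Python) =====
-- def old_approach_simulation(num_agents):
--     """Closed form: 4 operations per agent, no iteration."""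
--     return 4 * max(num_agents, 0)
-- ===== Notes on version B (the rewrite author's own statement) =====
-- stated objective: faster
-- what changed: Replaced the per-agent counting loop with the closed form 4*max(num_agents,0).
import Mathlib
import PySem

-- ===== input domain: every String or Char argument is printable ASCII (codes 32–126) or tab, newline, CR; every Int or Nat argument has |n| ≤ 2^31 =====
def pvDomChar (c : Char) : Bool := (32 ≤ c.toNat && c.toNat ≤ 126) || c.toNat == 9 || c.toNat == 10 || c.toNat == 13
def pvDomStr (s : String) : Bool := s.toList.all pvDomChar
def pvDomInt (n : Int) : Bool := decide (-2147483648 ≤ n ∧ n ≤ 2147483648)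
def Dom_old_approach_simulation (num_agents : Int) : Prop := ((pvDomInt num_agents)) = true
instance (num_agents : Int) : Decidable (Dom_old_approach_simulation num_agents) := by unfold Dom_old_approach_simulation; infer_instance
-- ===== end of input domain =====

-- B replaces the per-agent counting loop with the closed form 4*max(num_agents,0) (faster, O(1)).

-- ===== PORT A =====
def old_approach_simulation (num_agents : Int) : Int :=
  (PySem.List.pyRange 0 num_agents 1).foldl (fun operations _ => operations + 1 + 1 + 1 + 1) 0

-- ===== PORT B =====
def old_approach_simulation_alt (num_agents : Int) : Int :=
  4 * max num_agents 0

-- ===== PRECONDITION & SPEC =====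
def Spec_old_approach_simulation (num_agents : Int) (out : Int) : Prop := out = old_approach_simulation_alt num_agents
instance (num_agents : Int) (out : Int) : Decidable (Spec_old_approach_simulation num_agents out) := by unfold Spec_old_approach_simulation; infer_instance

-- ===== CLAIM (what is proved, stated in full; the proofs are below) =====
def Claim_equal_old_approach_simulation : Prop := ∀ (num_agents : Int), Dom_old_approach_simulation num_agents → Spec_old_approach_simulation num_agents (old_approach_simulation num_agents)

-- ===== LEMMAS AND PROOFS =====

theorem pv_foldl_add4 (l : List Int) (acc : Int) :
    l.foldl (fun operations _ => operations + 1 + 1 + 1 + 1) acc = acc + 4 * l.length := by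
  induction l generalizing acc with
  | nil => simp
  | cons x xs ih => simp [List.foldl, ih]; ring

-- ===== VERDICT (by name: the statement is the Claim_ definition above) =====
theorem old_approach_simulation_spec : Claim_equal_old_approach_simulation := by
  intro n _
  unfold Spec_old_approach_simulation old_approach_simulation old_approach_simulation_alt
  rw [pv_foldl_add4, PySem.List.length_pyRange_one]
  omega
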